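-- pv_equiv track=rewrite | github.com/hidude562/OpenMusenet2 | OpenMusenet3/utils.py | toAIVelocity
-- ===== SOURCE A (Python) =====
-- def toAIVelocity(inputNum: int):
--     velocityMap = {
--         48: "!",
--         60: "@",
--         100: "#",
--     }
--     for i in velocityMap.keys():
--         if inputNum <= i:
--             return velocityMap[i]
--     return "$"
-- ===== SOURCE B (Python) =====
-- def toAIVelocity(inputNum: int):
--     # bisect_left over sorted thresholds; bucket found by index, no per-threshold scan
--     thresholds = [48, 60, 100]
--     symbols = ["!", "@", "#", "$"]
--     lo, hi = 0, 3
--     while lo < hi: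
--         mid = (lo + hi) // 2
--         if thresholds[mid] < inputNum:
--             lo = mid + 1
--         else:
--             hi = mid
--     return symbols[lo]
-- ===== Notes on version B (the rewrite author's own statement) =====
-- stated objective: alternative
-- what changed: Replaces the sequential scan over a dict's keys with a hand-rolled bisect_left binary search over a sorted thresholds list, indexing a parallel symbols list by the found position.
import Mathlib
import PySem

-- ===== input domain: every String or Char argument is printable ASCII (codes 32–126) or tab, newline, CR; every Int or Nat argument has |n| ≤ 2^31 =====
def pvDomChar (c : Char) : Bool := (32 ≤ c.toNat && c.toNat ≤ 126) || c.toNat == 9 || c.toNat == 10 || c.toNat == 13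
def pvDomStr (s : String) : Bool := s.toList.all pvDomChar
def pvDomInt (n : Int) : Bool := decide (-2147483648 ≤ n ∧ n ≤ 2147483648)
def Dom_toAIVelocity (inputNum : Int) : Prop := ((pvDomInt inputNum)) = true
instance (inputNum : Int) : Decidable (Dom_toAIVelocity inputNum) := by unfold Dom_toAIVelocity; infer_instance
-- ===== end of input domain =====

-- B replaces A's sequential scan over dict keys with a bisect_left binary search over a
-- sorted thresholds list indexed into a parallel symbols list (alternative algorithm).


-- ===== PORT A =====
-- the for-loop over velocityMap.keys(): first key with inputNum ≤ key wins, else "$"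
def toAIVelocityLoop (velocityMap : PySem.Dict Int String) (inputNum : Int) : List Int → String
  | [] => "$"
  | i :: rest =>
    if inputNum ≤ i then (velocityMap.get? i).getD "" else toAIVelocityLoop velocityMap inputNum rest

def toAIVelocity (inputNum : Int) : String :=
  let velocityMap : PySem.Dict Int String :=
    ((PySem.Dict.empty.insert 48 "!").insert 60 "@").insert 100 "#"
  toAIVelocityLoop velocityMap inputNum velocityMap.keys

-- ===== PORT B =====
-- hand-rolled bisect_left (the while-loop of Source B), recursion on hi - lo
def bisectLeftLoop (thresholds : List Int) (inputNum : Int) (lo hi : Nat) : Nat :=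
  if lo < hi then
    let mid := (lo + hi) / 2
    if thresholds.getD mid 0 < inputNum then bisectLeftLoop thresholds inputNum (mid + 1) hi
    else bisectLeftLoop thresholds inputNum lo mid
  else lo
termination_by hi - lo
decreasing_by all_goals omega

def toAIVelocity_alt (inputNum : Int) : String :=
  let thresholds : List Int := [48, 60, 100]
  let symbols : List String := ["!", "@", "#", "$"]
  symbols.getD (bisectLeftLoop thresholds inputNum 0 3) ""

-- ===== PRECONDITION & SPEC =====
def Spec_toAIVelocity (inputNum : Int) (out : String) : Prop := out = toAIVelocity_alt inputNum
instance (inputNum : Int) (out : String) : Decidable (Spec_toAIVelocity inputNum out) := by unfold Spec_toAIVelocity; infer_instance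

-- ===== CLAIM (what is proved, stated in full; the proofs are below) =====
def Claim_equal_toAIVelocity : Prop := ∀ (inputNum : Int), Dom_toAIVelocity inputNum → Spec_toAIVelocity inputNum (toAIVelocity inputNum)

-- ===== LEMMAS AND PROOFS =====
-- both ports reduce to the same explicit threshold chain
theorem toAIVelocity_eq_chain (n : Int) :
    toAIVelocity n = if n ≤ 48 then "!" else if n ≤ 60 then "@" else if n ≤ 100 then "#" else "$" := by
  simp [toAIVelocity, toAIVelocityLoop, PySem.Dict.keys, PySem.Dict.insert, PySem.Dict.empty,
        PySem.Dict.get?]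

theorem toAIVelocity_alt_eq_chain (n : Int) :
    toAIVelocity_alt n = if n ≤ 48 then "!" else if n ≤ 60 then "@" else if n ≤ 100 then "#" else "$" := by
  by_cases h48 : n ≤ 48
  · have h60 : ¬ (60 : Int) < n := by omega
    have h48' : ¬ (48 : Int) < n := by omega
    simp [toAIVelocity_alt, bisectLeftLoop, h48, h60, h48']
  · by_cases h60 : n ≤ 60
    · have h60' : ¬ (60 : Int) < n := by omega
      have h48' : (48 : Int) < n := by omega
      simp [toAIVelocity_alt, bisectLeftLoop, h48, h60, h60', h48']
    · by_cases h100 : n ≤ 100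
      · have h60' : (60 : Int) < n := by omega
        have h100' : ¬ (100 : Int) < n := by omega
        simp [toAIVelocity_alt, bisectLeftLoop, h48, h60, h100, h60', h100']
      · have h60' : (60 : Int) < n := by omega
        have h100' : (100 : Int) < n := by omega
        simp [toAIVelocity_alt, bisectLeftLoop, h48, h60, h100, h60', h100']

-- ===== VERDICT (by name: the statement is the Claim_ definition above) =====
theorem toAIVelocity_spec : Claim_equal_toAIVelocity := by
  intro n _
  unfold Spec_toAIVelocity
  rw [toAIVelocity_eq_chain, toAIVelocity_alt_eq_chain]
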